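-- pv_equiv track=rewrite | github.com/dfeyerabend/multi-agent-code-review | knowledge_base/create_database.py | chunk_by_headings
-- ===== SOURCE A (Python) =====
-- def chunk_by_headings(text: str) -> list[dict]:
--     """
--     Splits markdown text into chunks at every ### heading.
--     Each chunk includes the heading line + all content until the next heading.
--     Returns a list of dicts with 'heading' and 'content'.
--     """
--     chunks = []
--     current_heading = ""
--     current_lines = []
--
--     for line in text.split("\n"):
--         if line.startswith("### "):                                     # start of a new chunk
--             if current_lines:                                           # save the previous chunk before starting a new one
--                 content = "\n".join(current_lines).strip()
--                 if content:
--                     chunks.append({"heading": current_heading, "content": content})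
--             current_heading = line[4:].strip()                          # strip the '### ' prefix to get the title
--             current_lines = [line]                                      # include the heading line in the chunk content
--         else:
--             current_lines.append(line)
--
--     # save the final lines after the loop ends
--     if current_lines:
--         content = "\n".join(current_lines).strip()
--         if content:
--             chunks.append({"heading": current_heading, "content": content})
--
--     return chunks
-- ===== SOURCE B (Python) =====
-- def chunk_by_headings(text: str) -> list[dict]:
--     """Segment-first rewrite: split the lines into (heading, segment) spans
--     at '### ' lines, then emit non-empty segments in a second pass."""
--     lines = text.split("\n")
--     k = 0
--     while k < len(lines) and not lines[k].startswith("### "):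
--         k += 1
--     segs = [("", lines[:k])]
--     rest = lines[k:]
--     while rest:
--         j = 1
--         while j < len(rest) and not rest[j].startswith("### "):
--             j += 1
--         segs.append((rest[0][4:].strip(), rest[:j]))
--         rest = rest[j:]
--     out = []
--     for heading, seg in segs:
--         content = "\n".join(seg).strip()
--         if content:
--             out.append({"heading": heading, "content": content})
--     return out
-- ===== Notes on version B (the rewrite author's own statement) =====
-- stated objective: alternative
-- what changed: Replaces A's single accumulator loop that flushes a chunk at every heading by a two-phase decomposition: first cut the line list into (heading, segment) spans , then a separate pass emits the non-empty segments.
import Mathlib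
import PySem

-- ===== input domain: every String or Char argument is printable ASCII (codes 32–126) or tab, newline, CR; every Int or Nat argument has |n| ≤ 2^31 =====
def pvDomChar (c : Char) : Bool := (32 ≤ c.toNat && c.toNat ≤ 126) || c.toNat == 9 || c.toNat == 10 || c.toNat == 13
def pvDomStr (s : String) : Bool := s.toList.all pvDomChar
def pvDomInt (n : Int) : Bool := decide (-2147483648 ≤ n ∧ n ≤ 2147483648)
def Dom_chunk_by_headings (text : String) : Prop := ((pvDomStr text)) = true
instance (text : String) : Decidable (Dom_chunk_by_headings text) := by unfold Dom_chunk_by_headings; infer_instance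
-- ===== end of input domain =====

-- B replaces A's flush-on-the-fly accumulator loop by a segment-first decomposition
-- (span the lines into (heading, segment) spans, then a separate emit pass); objective: alternative.

-- ===== PORT A =====
-- the trailing flush of A's loop (also run at every heading line)
def pvFlushA (chunks : List (List (String × String))) (h : String) (cur : List String) :
    List (List (String × String)) :=
  if cur ≠ [] then
    let content := PySem.Str.strip (PySem.Str.join "\n" cur)
    if content ≠ "" then chunks ++ [[("heading", h), ("content", content)]] else chunks
  else chunks

def pvStepA (st : List (List (String × String)) × String × List String) (line : String) :
    List (List (String × String)) × String × List String :=
  if PySem.Str.startswith line "### " then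
    (pvFlushA st.1 st.2.1 st.2.2, PySem.Str.strip (PySem.Str.slice line (some 4) none), [line])
  else (st.1, st.2.1, st.2.2 ++ [line])

def chunk_by_headings (text : String) : List (List (String × String)) :=
  let st := ((PySem.Str.split? text "\n").getD []).foldl pvStepA ([], "", [])
  pvFlushA st.1 st.2.1 st.2.2

-- ===== PORT B =====
def pvNotHead (l : String) : Bool := !(PySem.Str.startswith l "### ")

-- the inner while loops of B: cut the line list into (heading, segment) spans
def pvSegs : List String → List (String × List String)
  | [] => []
  | L :: rest =>
      (PySem.Str.strip (PySem.Str.slice L (some 4) none), L :: rest.takeWhile pvNotHead)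
        :: pvSegs (rest.dropWhile pvNotHead)
  termination_by ls => ls.length
  decreasing_by
    simp only [List.length_cons]
    exact Nat.lt_succ_of_le (List.length_dropWhile_le _ _)

-- B's final for-loop body
def pvEmit (hs : String × List String) : List (List (String × String)) :=
  let content := PySem.Str.strip (PySem.Str.join "\n" hs.2)
  if content ≠ "" then [[("heading", hs.1), ("content", content)]] else []

def chunk_by_headings_alt (text : String) : List (List (String × String)) :=
  let lines := (PySem.Str.split? text "\n").getD []
  let segs := ("", lines.takeWhile pvNotHead) :: pvSegs (lines.dropWhile pvNotHead)
  segs.foldl (fun acc hs => acc ++ pvEmit hs) []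

-- ===== PRECONDITION & SPEC =====
def Spec_chunk_by_headings (text : String) (out : List (List (String × String))) : Prop := out = chunk_by_headings_alt text
instance (text : String) (out : List (List (String × String))) : Decidable (Spec_chunk_by_headings text out) := by unfold Spec_chunk_by_headings; infer_instance

-- ===== CLAIM (what is proved, stated in full; the proofs are below) =====
def Claim_equal_chunk_by_headings : Prop := ∀ (text : String), Dom_chunk_by_headings text → Spec_chunk_by_headings text (chunk_by_headings text)

-- ===== LEMMAS AND PROOFS =====

-- A's flush is B's emit (appended): the `cur = []` guard is redundant since join [] strips to "".
theorem pvFlushA_eq_emit (c : List (List (String × String))) (h : String) (cur : List String) :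
    pvFlushA c h cur = c ++ pvEmit (h, cur) := by
  cases cur with
  | nil => simp [pvFlushA, pvEmit]; decide
  | cons x xs => simp only [pvFlushA, pvEmit]; split_ifs <;> simp_all

-- recursive characterisation of A's loop result (state h, cur, remaining lines)
def pvE (h : String) (cur : List String) : List String → List (List (String × String))
  | [] => pvEmit (h, cur)
  | L :: rest =>
      if PySem.Str.startswith L "### " then
        pvEmit (h, cur) ++ pvE (PySem.Str.strip (PySem.Str.slice L (some 4) none)) [L] rest
      else
        pvE h (cur ++ [L]) rest

theorem pvLoopA_eq_pvE (ls : List String) :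
    ∀ (c : List (List (String × String))) (h : String) (cur : List String),
      pvFlushA (ls.foldl pvStepA (c, h, cur)).1 (ls.foldl pvStepA (c, h, cur)).2.1
          (ls.foldl pvStepA (c, h, cur)).2.2 = c ++ pvE h cur ls := by
  induction ls with
  | nil => intro c h cur; simp [pvE, pvFlushA_eq_emit]
  | cons L rest ih =>
      intro c h cur
      simp only [List.foldl_cons, pvStepA, pvE]
      by_cases hL : PySem.Str.startswith L "### "
      · simp only [hL, if_pos]
        rw [ih, pvFlushA_eq_emit, List.append_assoc]
      · simp only [hL, if_neg, Bool.false_eq_true, not_false_iff]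
        exact ih c h (cur ++ [L])

def pvSegsEmit (rest : List String) : List (List (String × String)) :=
  (pvSegs rest).flatMap pvEmit

theorem pvSegsEmit_nil : pvSegsEmit [] = [] := by
  rw [pvSegsEmit, pvSegs]; rfl

theorem pvSegsEmit_cons (L : String) (rest : List String) :
    pvSegsEmit (L :: rest) =
      pvEmit (PySem.Str.strip (PySem.Str.slice L (some 4) none), L :: rest.takeWhile pvNotHead)
        ++ pvSegsEmit (rest.dropWhile pvNotHead) := by
  rw [pvSegsEmit, pvSegs, List.flatMap_cons, pvSegsEmit]

-- pvE over a line list = emit of the current span, then the remaining spans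
theorem pvE_eq_spans (ls : List String) :
    ∀ (h : String) (cur : List String),
      pvE h cur ls = pvEmit (h, cur ++ ls.takeWhile pvNotHead) ++ pvSegsEmit (ls.dropWhile pvNotHead) := by
  induction ls with
  | nil => intro h cur; simp [pvE, pvSegsEmit_nil]
  | cons L rest ih =>
      intro h cur
      by_cases hL : PySem.Str.startswith L "### "
      · have hp : pvNotHead L = false := by simp only [pvNotHead, hL, Bool.not_true]
        simp only [pvE, hL, if_pos, List.takeWhile_cons, List.dropWhile_cons, hp,
          Bool.false_eq_true, if_false, List.append_nil]
        rw [ih, pvSegsEmit_cons]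
        simp
      · have hp : pvNotHead L = true := by simp only [pvNotHead, hL, Bool.not_eq_true']
        simp only [pvE, hL, Bool.false_eq_true, if_false, List.takeWhile_cons, List.dropWhile_cons, hp, if_pos]
        rw [ih]
        simp

-- ===== VERDICT (by name: the statement is the Claim_ definition above) =====
theorem chunk_by_headings_spec : Claim_equal_chunk_by_headings := by
  intro text _
  show chunk_by_headings text = chunk_by_headings_alt text
  unfold chunk_by_headings chunk_by_headings_alt
  have h1 := pvLoopA_eq_pvE ((PySem.Str.split? text "\n").getD []) [] "" []
  simp only [List.nil_append] at h1
  rw [h1, pvE_eq_spans]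
  simp [pvSegsEmit, List.flatMap]
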